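-- pv_equiv track=rewrite | github.com/choi-yh/coding_test | Brute_Force/BOJ_1436_영화감독_숌.py | get_end_number
-- ===== SOURCE A (Python) =====
-- def get_end_number(n):
--     num, cnt = 0, 0
--     while True:
--         num += 1
--         if "666" in str(num):
--             cnt += 1
--
--         if cnt == n:
--             return num
-- ===== SOURCE B (Python) =====
-- def _step(q, d):
--     # pattern-matching automaton for "666": q = length of matched prefix, 3 = found (absorbing)
--     if q == 3:
--         return 3
--     return q + 1 if d == 6 else 0
--
--
-- def _count_from(ds, q):
--     # ds: digit list (most significant first).  Returns a pair:
--     #   - number of digit strings t of length len(ds), lexicographically below ds,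
--     #     that drive the automaton from state q into the 'found' state;
--     #   - row[s] = number of arbitrary digit strings of length len(ds) that drive
--     #     the automaton from state s into 'found' (independent of q).
--     if not ds:
--         return (0, [0, 0, 0, 1])
--     c, row = _count_from(ds[1:], _step(q, ds[0]))
--     c += sum(row[_step(q, e)] for e in range(ds[0]))
--     newrow = [sum(row[_step(s, d)] for d in range(10)) for s in range(4)]
--     return (c, newrow)
--
--
-- def _count_lt(x):
--     # how many integers in [0, x) contain '666' in decimal
--     if x <= 0:
--         return 0
--     ds = [ord(c) - 48 for c in str(x)]
--     return _count_from(ds, 0)[0]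
--
--
-- def get_end_number(n):
--     # binary search over the value, with a digit-DP counting function
--     lo, hi = 0, 1000 * n + 666  # the n-th such number is at most 1000*n + 666
--     while lo + 1 < hi:
--         mid = (lo + hi) // 2
--         if _count_lt(mid + 1) >= n:
--             hi = mid
--         else:
--             lo = mid
--     return hi
-- ===== Notes on version B (the rewrite author's own statement) =====
-- stated objective: faster
-- what changed: replaces A's scan over every integer (testing each for the substring '666') by a binary search over the answer's value combined with a digit-DP counting function that computes how many integers below X contain '666' in O(digits) time, so no integer below the answer is ever visited
import Mathlib
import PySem

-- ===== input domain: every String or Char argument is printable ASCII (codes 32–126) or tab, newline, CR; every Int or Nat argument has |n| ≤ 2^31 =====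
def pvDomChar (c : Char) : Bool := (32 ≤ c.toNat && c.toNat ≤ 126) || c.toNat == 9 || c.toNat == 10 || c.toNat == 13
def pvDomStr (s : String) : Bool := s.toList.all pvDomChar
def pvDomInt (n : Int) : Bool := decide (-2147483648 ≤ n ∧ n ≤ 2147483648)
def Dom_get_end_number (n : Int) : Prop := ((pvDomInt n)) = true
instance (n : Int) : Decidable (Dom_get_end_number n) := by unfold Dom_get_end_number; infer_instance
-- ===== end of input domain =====

-- B replaces A's scan over every integer (substring test on each) by a binary search over the
-- answer's value driven by a digit-DP counting function (objective: faster, asymptotically).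

-- ===== PORT A =====
-- while True: num += 1; if "666" in str(num): cnt += 1; if cnt == n: return num
-- (fuel only makes the loop total; it is never exhausted on the inputs admitted by Pre_)
def pvGoA (n : Int) : Nat → Int → Int → Int
  | 0, _, _ => 0
  | f+1, num, cnt =>
    let num' := num + 1
    let cnt' := if PySem.Str.isIn "666" (PySem.Int.toStr num') then cnt + 1 else cnt
    if cnt' = n then num' else pvGoA n f num' cnt'

def get_end_number (n : Int) : Int := pvGoA n 2147483648666 0 0

-- ===== PORT B =====
-- _step: pattern automaton for "666"; state q = matched prefix length, 3 = found (absorbing)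
def pvStep (q d : Int) : Int := if q = 3 then 3 else if d = 6 then q + 1 else 0

-- row[i] for a state i; the states handed to it are always 0..3, inside the 4-element row,
-- so the .getD 0 after the exact pyGet? is never taken
def pvRow (row : List Int) (i : Int) : Int := (PySem.List.pyGet? row i).getD 0

-- _count_from(ds, q): recursion on the digit list (sum(...) ported as a fold over the range)
def pvCountFrom : List Int → Int → Int × List Int
  | [], _ => (0, [0, 0, 0, 1])
  | d :: ds, q =>
    let p := pvCountFrom ds (pvStep q d)
    let c := p.1 + (PySem.List.pyRange 0 d 1).foldl (fun a e => a + pvRow p.2 (pvStep q e)) 0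
    let row' := (PySem.List.pyRange 0 4 1).map (fun s =>
      (PySem.List.pyRange 0 10 1).foldl (fun a t => a + pvRow p.2 (pvStep s t)) 0)
    (c, row')

-- _count_lt(x): digits of str(x) via ord(c) - 48
def pvCountLt (x : Int) : Int :=
  if x ≤ 0 then 0
  else (pvCountFrom ((PySem.Int.toStr x).toList.map (fun c => ((c.toNat : Int) - 48))) 0).1

-- while lo + 1 < hi: … (fuel only makes the loop total; it is never exhausted on the
-- inputs admitted by Pre_, since the interval halves each round)
def pvSearch (n : Int) : Nat → Int → Int → Int
  | 0, _, hi => hi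
  | f+1, lo, hi =>
    if lo + 1 < hi then
      let mid := PySem.Int.floordiv (lo + hi) 2
      if n ≤ pvCountLt (mid + 1) then pvSearch n f lo mid
      else pvSearch n f mid hi
    else hi

def get_end_number_alt (n : Int) : Int := pvSearch n 64 0 (1000 * n + 666)

-- ===== PRECONDITION & SPEC =====
-- Pre_ excludes n < 0 only: there A's while-loop never terminates (cnt never equals n).
def Pre_get_end_number (n : Int) : Prop := 0 ≤ n
instance (n : Int) : Decidable (Pre_get_end_number n) := by unfold Pre_get_end_number; infer_instance

def pvWitness_get_end_number : Int := 1

def Spec_get_end_number (n : Int) (out : Int) : Prop := out = get_end_number_alt n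
instance (n : Int) (out : Int) : Decidable (Spec_get_end_number n out) := by unfold Spec_get_end_number; infer_instance

-- ===== CLAIM (what is proved, stated in full; the proofs are below) =====
def Claim_equal_get_end_number : Prop := ∀ (n : Int), Dom_get_end_number n → Pre_get_end_number n → Spec_get_end_number n (get_end_number n)

-- ===== LEMMAS AND PROOFS =====

-- ---- the reference predicate: pvHas666 m = "the decimal form of m contains 666" ----
def pvHas666 (num : Int) : Bool :=
  if 666 ≤ num then
    if PySem.Int.mod num 1000 = 666 then true
    else pvHas666 (PySem.Int.floordiv num 10)
  else false
termination_by num.toNat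
decreasing_by
  rw [PySem.Int.floordiv_eq_ediv_of_pos (by norm_num)]
  omega

-- ---- decimal strings: Nat.toDigits vs Nat.digits ----
lemma pvToDigitsCore_eq (a : Nat) : ∀ (f : Nat) (ds : List Char), a < f →
    Nat.toDigitsCore 10 f a ds
      = (if a = 0 then ['0'] else ((Nat.digits 10 a).map Nat.digitChar).reverse) ++ ds := by
  induction a using Nat.strong_induction_on with
  | _ a IH =>
    intro f ds hf
    match f, hf with
    | f+1, hf =>
      rw [Nat.toDigitsCore]
      by_cases h0 : a / 10 = 0
      · simp only [h0, reduceIte]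
        by_cases ha : a = 0
        · subst ha; simp; decide
        · have : Nat.digits 10 a = [a % 10] := by
            rw [Nat.digits_def' (by norm_num) (by omega)]
            simp [h0]
          simp [ha, this]
      · simp only [if_neg h0]
        rw [IH (a / 10) (by omega) f (Nat.digitChar (a % 10) :: ds) (by omega)]
        rw [if_neg h0]
        rw [Nat.digits_def' (b := 10) (by norm_num) (n := a) (by omega)]
        rw [if_neg (by omega)]
        simp

lemma pvToDigits_eq (a : Nat) (ha : a ≠ 0) :
    Nat.toDigits 10 a = ((Nat.digits 10 a).map Nat.digitChar).reverse := by
  rw [Nat.toDigits, pvToDigitsCore_eq a (a+1) [] (by omega), if_neg ha, List.append_nil]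

-- ---- pvHas666 via Nat.digits ----
lemma pvHas666_natCast (a : Nat) :
    pvHas666 (a : Int) = if 666 ≤ a then (if a % 1000 = 666 then true else pvHas666 ((a / 10 : Nat) : Int)) else false := by
  rw [pvHas666]
  by_cases h : 666 ≤ a
  · rw [if_pos (by exact_mod_cast h), if_pos h]
    have hm : PySem.Int.mod (a : Int) 1000 = ((a % 1000 : Nat) : Int) := by
      exact_mod_cast PySem.Int.mod_natCast a 1000
    have hd : PySem.Int.floordiv (a : Int) 10 = ((a / 10 : Nat) : Int) := by
      exact_mod_cast PySem.Int.floordiv_natCast a 10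
    rw [hm, hd]
    by_cases h6 : a % 1000 = 666
    · rw [if_pos h6, if_pos (by exact_mod_cast h6)]
    · rw [if_neg h6, if_neg (by exact_mod_cast h6)]
  · rw [if_neg (by exact_mod_cast h), if_neg h]

lemma pvHas666_small {a : Nat} (h : a < 666) : pvHas666 (a : Int) = false := by
  rw [pvHas666_natCast, if_neg (by omega)]

lemma pvPrefix666 {a : Nat} (ha : 1 ≤ a)
    (h : [6, 6, 6] <+: Nat.digits 10 a) : a % 1000 = 666 := by
  rw [Nat.digits_def' (by norm_num) (by omega)] at h
  by_cases h1 : a / 10 = 0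
  · simp [h1] at h
  · rw [Nat.digits_def' (by norm_num) (by omega : 0 < a / 10)] at h
    by_cases h2 : a / 10 / 10 = 0
    · simp [h2] at h
    · rw [Nat.digits_def' (by norm_num) (by omega : 0 < a / 10 / 10)] at h
      simp only [List.cons_prefix_cons] at h
      obtain ⟨c0, c1, c2, -⟩ := h
      omega

lemma pvInfix_iff_has666 (a : Nat) (ha : 1 ≤ a) :
    ([6, 6, 6] <:+: Nat.digits 10 a) ↔ pvHas666 (a : Int) = true := by
  induction a using Nat.strong_induction_on with
  | _ a IH =>
    by_cases h666 : a % 1000 = 666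
    · have h6 : 666 ≤ a := by omega
      constructor
      · intro _; rw [pvHas666_natCast, if_pos h6, if_pos h666]
      · intro _
        rw [Nat.digits_def' (by norm_num) (by omega : 0 < a),
            Nat.digits_def' (by norm_num) (by omega : 0 < a / 10),
            Nat.digits_def' (by norm_num) (by omega : 0 < a / 10 / 10)]
        have e0 : a % 10 = 6 := by omega
        have e1 : a / 10 % 10 = 6 := by omega
        have e2 : a / 10 / 10 % 10 = 6 := by omega
        rw [e0, e1, e2]
        exact ⟨[], Nat.digits 10 (a/10/10/10), by simp⟩
    · rw [Nat.digits_def' (by norm_num) (by omega : 0 < a), List.infix_cons_iff]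
      have hpre : ¬ ([6, 6, 6] <+: (a % 10) :: Nat.digits 10 (a / 10)) := by
        intro hp
        exact h666 (pvPrefix666 ha (by rw [Nat.digits_def' (by norm_num) (by omega : 0 < a)]; exact hp))
      by_cases hge : 666 ≤ a
      · rw [pvHas666_natCast, if_pos hge, if_neg h666]
        have := IH (a / 10) (by omega) (by omega)
        constructor
        · intro h; rcases h with h | h
          · exact absurd h hpre
          · exact this.mp h
        · intro h; exact Or.inr (this.mpr h)
      · constructor
        · intro h
          rcases h with h | h
          · exact absurd h hpre
          · by_cases h10 : a < 10
            · have : a / 10 = 0 := by omega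
              simp [this] at h
            · have := (IH (a / 10) (by omega) (by omega)).mp h
              rw [pvHas666_small (by omega : a / 10 < 666)] at this
              exact absurd this (by simp)
        · intro h
          rw [pvHas666_small (by omega : a < 666)] at h
          exact absurd h (by simp)

-- ---- A's substring test equals pvHas666 ----
lemma pvDigitChar_eq_six {d : Nat} (h : d < 10) : Nat.digitChar d = '6' ↔ d = 6 := by
  interval_cases d <;> decide

lemma pvCharPrefix666 {a : Nat} (ha : 1 ≤ a)
    (h : ['6','6','6'] <+: (Nat.digits 10 a).map Nat.digitChar) : [6, 6, 6] <+: Nat.digits 10 a := by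
  rw [Nat.digits_def' (by norm_num) (by omega)] at h ⊢
  by_cases h1 : a / 10 = 0
  · simp [h1] at h
  · rw [Nat.digits_def' (by norm_num) (by omega : 0 < a / 10)] at h ⊢
    by_cases h2 : a / 10 / 10 = 0
    · simp [h2] at h
    · rw [Nat.digits_def' (by norm_num) (by omega : 0 < a / 10 / 10)] at h ⊢
      simp only [List.map_cons, List.cons_prefix_cons] at h
      obtain ⟨c0, c1, c2, -⟩ := h
      rw [eq_comm, pvDigitChar_eq_six (by omega)] at c0
      rw [eq_comm, pvDigitChar_eq_six (by omega)] at c1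
      rw [eq_comm, pvDigitChar_eq_six (by omega)] at c2
      simp [c0, c1, c2]

lemma pvCharInfix_iff (a : Nat) (ha : 1 ≤ a) :
    (['6','6','6'] <:+: (Nat.digits 10 a).map Nat.digitChar) ↔ ([6, 6, 6] <:+: Nat.digits 10 a) := by
  induction a using Nat.strong_induction_on with
  | _ a IH =>
    rw [Nat.digits_def' (by norm_num) (by omega : 0 < a), List.map_cons,
        List.infix_cons_iff, List.infix_cons_iff]
    constructor
    · intro h
      rcases h with h | h
      · left
        have := pvCharPrefix666 ha (by rw [Nat.digits_def' (by norm_num) (by omega : 0 < a), List.map_cons]; exact h)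
        rw [Nat.digits_def' (by norm_num) (by omega : 0 < a)] at this
        exact this
      · right
        by_cases h1 : a / 10 = 0
        · simp [h1] at h
        · exact (IH (a / 10) (by omega) (by omega)).mp h
    · intro h
      rcases h with h | h
      · left
        obtain ⟨t, ht⟩ := h
        refine ⟨t.map Nat.digitChar, ?_⟩
        calc (['6','6','6'] : List Char) ++ t.map Nat.digitChar
            = ([6,6,6] ++ t).map Nat.digitChar := by simp; decide
          _ = ((a % 10) :: Nat.digits 10 (a / 10)).map Nat.digitChar := by rw [ht]
          _ = Nat.digitChar (a % 10) :: (Nat.digits 10 (a / 10)).map Nat.digitChar := rfl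
      · right
        by_cases h1 : a / 10 = 0
        · simp [h1] at h
        · exact (IH (a / 10) (by omega) (by omega)).mpr h

lemma pvIsIn_eq_has666 (m : Int) (hm : 1 ≤ m) :
    PySem.Str.isIn "666" (PySem.Int.toStr m) = pvHas666 m := by
  have htl : (PySem.Int.toStr m).toList = Nat.toDigits 10 m.toNat := by
    rw [PySem.Int.toList_toStr, PySem.Int.toChars, if_neg (by omega)]
  have hmn : ((m.toNat : Nat) : Int) = m := by omega
  rw [Bool.eq_iff_iff, PySem.Str.isIn_iff_infix, htl,
      pvToDigits_eq m.toNat (by omega)]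
  have h1 : ("666".toList : List Char) = ['6','6','6'] := by decide
  rw [h1]
  have h2 : (['6','6','6'] : List Char) = (['6','6','6'] : List Char).reverse := by decide
  rw [h2, List.reverse_infix, pvCharInfix_iff m.toNat (by omega),
      pvInfix_iff_has666 m.toNat (by omega), hmn]

-- ---- the family 1000*t + 666 and the successor function pvNext ----
lemma pvHas666_block (t : Int) (ht : 0 ≤ t) : pvHas666 (1000 * t + 666) = true := by
  rw [pvHas666]
  rw [if_pos (by omega)]
  rw [if_pos]
  rw [PySem.Int.mod_eq_emod_of_pos (by norm_num)]
  omega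

lemma pvExNext (s : Int) : ∃ d : Nat, pvHas666 (s + 1 + (d : Int)) = true := by
  refine ⟨(1000 * ((s.toNat : Int) + 1) + 666 - (s + 1)).toNat, ?_⟩
  have hs : s ≤ (s.toNat : Int) := by omega
  have he : s + 1 + ((1000 * ((s.toNat : Int) + 1) + 666 - (s + 1)).toNat : Int)
      = 1000 * ((s.toNat : Int) + 1) + 666 := by omega
  rw [he]
  exact pvHas666_block _ (by omega)

def pvNext (s : Int) : Int := s + 1 + (Nat.find (pvExNext s) : Int)

lemma pvNext_has (s : Int) : pvHas666 (pvNext s) = true := Nat.find_spec (pvExNext s)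

lemma pvNext_gt (s : Int) : s < pvNext s := by
  have : (0 : Int) ≤ (Nat.find (pvExNext s) : Int) := by positivity
  unfold pvNext; omega

lemma pvNext_min {s x : Int} (hx : s < x) (h : pvHas666 x = true) : pvNext s ≤ x := by
  by_contra hc
  rw [not_le] at hc
  have hd : x = s + 1 + ((x - (s+1)).toNat : Int) := by omega
  have hlt : (x - (s+1)).toNat < Nat.find (pvExNext s) := by
    unfold pvNext at hc; omega
  exact Nat.find_min (pvExNext s) hlt (by rw [← hd]; exact h)

lemma pvNext_none {s y : Int} (h1 : s < y) (h2 : y < pvNext s) : pvHas666 y = false := by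
  by_contra hc
  have := pvNext_min h1 (by simpa using hc)
  omega

-- ---- iterating pvNext; pvNth k = the k-th positive integer containing 666 ----
def pvIter : Nat → Int → Int
  | 0, s => s
  | k+1, s => pvIter k (pvNext s)

def pvNth (k : Nat) : Int := pvIter k 0

lemma pvIter_ge (k : Nat) : ∀ s : Int, s + k ≤ pvIter k s := by
  induction k with
  | zero => intro s; simp [pvIter]
  | succ k IH =>
    intro s
    have h1 := pvNext_gt s
    have h2 := IH (pvNext s)
    show s + ((k : Int) + 1) ≤ pvIter k (pvNext s)
    omega

lemma pvIter_succ_right (k : Nat) : ∀ s : Int, pvIter (k+1) s = pvNext (pvIter k s) := by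
  induction k with
  | zero => intro s; simp [pvIter]
  | succ k IH =>
    intro s
    show pvIter (k+1) (pvNext s) = pvNext (pvIter (k+1) s)
    rw [IH (pvNext s)]
    rfl

lemma pvNext_succ_eq {s : Int} (h : pvHas666 (s + 1) = true) : pvNext s = s + 1 :=
  le_antisymm (pvNext_min (by omega) h) (by have := pvNext_gt s; omega)

lemma pvNext_skip {s : Int} (h : pvHas666 (s + 1) = false) : pvNext (s + 1) = pvNext s := by
  have h1 : s + 1 < pvNext s := by
    have hg := pvNext_gt s
    rcases lt_or_eq_of_le (by omega : s + 1 ≤ pvNext s) with hlt | heq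
    · exact hlt
    · rw [heq, pvNext_has s] at h; simp at h
  apply le_antisymm
  · exact pvNext_min h1 (pvNext_has s)
  · exact pvNext_min (by have := pvNext_gt (s+1); omega) (pvNext_has (s+1))

lemma pvIter_skip {s : Int} (h : pvHas666 (s + 1) = false) (k : Nat) (hk : 1 ≤ k) :
    pvIter k (s + 1) = pvIter k s := by
  match k, hk with
  | k+1, _ =>
    show pvIter k (pvNext (s+1)) = pvIter k (pvNext s)
    rw [pvNext_skip h]

lemma pvNth_succ (k : Nat) : pvNth (k+1) = pvNext (pvNth k) := pvIter_succ_right k 0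

lemma pvNth_nonneg (k : Nat) : 0 ≤ pvNth k := by
  have := pvIter_ge k 0
  unfold pvNth; omega

lemma pvNth_le (k : Nat) : pvNth k ≤ 1000 * k + 666 := by
  induction k with
  | zero => simp [pvNth, pvIter]
  | succ k IH =>
    rw [pvNth_succ]
    have hb : pvHas666 (1000 * ((k : Int) + 1) + 666) = true := pvHas666_block _ (by omega)
    have := pvNext_min (s := pvNth k) (x := 1000 * ((k : Int) + 1) + 666) (by omega) hb
    push_cast
    omega

-- ---- A's loop returns pvNth ----
lemma pvGoA_eq (n : Int) : ∀ (f : Nat) (k : Nat) (num : Int), 1 ≤ k → 0 ≤ num →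
    pvIter k num ≤ num + (f : Int) →
    pvGoA n f num (n - k) = pvIter k num := by
  intro f
  induction f with
  | zero =>
    intro k num hk _ hf
    have := pvIter_ge k num
    omega
  | succ f IH =>
    intro k num hk hnum hf
    show (let num' := num + 1;
      let cnt' := if PySem.Str.isIn "666" (PySem.Int.toStr num') then (n - k) + 1 else (n - k);
      if cnt' = n then num' else pvGoA n f num' cnt') = pvIter k num
    simp only
    rw [pvIsIn_eq_has666 (num + 1) (by omega)]
    by_cases hb : pvHas666 (num + 1) = true
    · rw [if_pos hb]
      match k, hk with
      | 1, _ =>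
        rw [if_pos (by omega)]
        show num + 1 = pvIter 0 (pvNext num)
        rw [pvNext_succ_eq hb]; rfl
      | k+2, _ =>
        rw [if_neg (by push_cast; omega)]
        have harr : n - ((k + 2 : Nat) : Int) + 1 = n - ((k+1 : Nat) : Int) := by push_cast; omega
        rw [harr]
        have hiter : pvIter (k+1) (num+1) = pvIter (k+2) num := by
          show pvIter (k+1) (num+1) = pvIter (k+1) (pvNext num)
          rw [pvNext_succ_eq hb]
        rw [IH (k+1) (num+1) (by omega) (by omega) (by rw [hiter]; push_cast at hf ⊢; omega)]
        exact hiter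
    · rw [if_neg hb] at *
      have hbf : pvHas666 (num + 1) = false := by simpa using hb
      rw [if_neg (by omega : ¬ (n - (k:Int) = n))]
      have hiter : pvIter k (num+1) = pvIter k num := pvIter_skip hbf k hk
      rw [IH k (num+1) hk (by omega) (by rw [hiter]; push_cast at hf ⊢; omega)]
      exact hiter

-- ==================== B side: digit DP ====================

-- natural-number mirror of the automaton
def natStep (q d : Nat) : Nat := if q = 3 then 3 else if d = 6 then q + 1 else 0

def natA : Nat → Nat → Nat
  | 0, s => if s = 3 then 1 else 0
  | k+1, s => ((List.range 10).map (fun d => natA k (natStep s d))).sum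

def natG : List Nat → Nat → Nat
  | [], _ => 0
  | d :: t, q => ((List.range d).map (fun e => natA t.length (natStep q e))).sum + natG t (natStep q d)

def pad : Nat → Nat → List Nat
  | 0, _ => []
  | k+1, m => (m / 10^k) :: pad k (m % 10^k)

def valD : List Nat → Nat
  | [] => 0
  | d :: t => d * 10^t.length + valD t

def specCnt (X : Nat) : Nat := (List.range X).countP (fun m : Nat => pvHas666 (m : Int))

lemma natStep_le (q d : Nat) (h : q ≤ 3) : natStep q d ≤ 3 := by
  unfold natStep; split_ifs <;> omega

lemma foldl_natStep_three (l : List Nat) : List.foldl natStep 3 l = 3 := by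
  induction l with
  | nil => rfl
  | cons d l IH => simpa [natStep] using IH

lemma reach_iff : ∀ (ds : List Nat) (q : Nat), q ≤ 2 →
    (List.foldl natStep q ds = 3 ↔ (List.replicate (3-q) 6 <+: ds ∨ [6, 6, 6] <:+: ds)) := by
  intro ds
  induction ds with
  | nil =>
    intro q hq
    constructor
    · intro h; simp only [List.foldl] at h; omega
    · rintro (h | h)
      · exfalso; have := h.length_le; simp at this; omega
      · exfalso; have := h.length_le; simp at this
  | cons d t IH =>
    intro q hq
    show (List.foldl natStep (natStep q d) t = 3 ↔ _)
    by_cases hd : d = 6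
    · subst hd
      have hstep : natStep q 6 = q + 1 := by unfold natStep; rw [if_neg (by omega)]; simp
      rw [hstep]
      by_cases hq2 : q = 2
      · subst hq2
        rw [foldl_natStep_three]
        have hrep : List.replicate (3 - 2) 6 = [6] := rfl
        rw [hrep]
        exact ⟨fun _ => Or.inl ⟨t, rfl⟩, fun _ => rfl⟩
      · rw [IH (q+1) (by omega)]
        have hrep : List.replicate (3 - q) 6 = 6 :: List.replicate (3 - (q+1)) 6 := by
          have : 3 - q = (3 - (q+1)) + 1 := by omega
          rw [this, List.replicate_succ]
        rw [hrep, List.infix_cons_iff]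
        constructor
        · rintro (h | h)
          · exact Or.inl (by simpa using h)
          · exact Or.inr (Or.inr h)
        · rintro (h | h | h)
          · exact Or.inl (by simpa using h)
          · -- [6,6,6] <+: 6 :: t  →  [6,6] <+: t  →  replicate (3-(q+1)) 6 <+: t
            left
            have h66 : [6, 6] <+: t := by
              obtain ⟨u, hu⟩ := h
              exact ⟨u, by simpa using hu⟩
            rcases Nat.lt_or_ge q 1 with hq0 | hq1
            · have : q = 0 := by omega
              subst this
              simpa [List.replicate] using h66
            · have : q = 1 := by omega
              subst this
              obtain ⟨u, hu⟩ := h66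
              exact ⟨6 :: u, by simpa [List.replicate] using hu⟩
          · exact Or.inr h
    · have hstep : natStep q d = 0 := by unfold natStep; rw [if_neg (by omega), if_neg hd]
      rw [hstep, IH 0 (by omega)]
      have hrep3 : List.replicate (3 - 0) 6 = [6, 6, 6] := rfl
      rw [hrep3]
      have hnotpre : ∀ j, 1 ≤ j → ¬ (List.replicate j 6 <+: d :: t) := by
        intro j hj hp
        obtain ⟨u, hu⟩ := hp
        match j, hj with
        | j+1, _ =>
          rw [List.replicate_succ, List.cons_append] at hu
          have h6d : (6 : Nat) = d := by
            have := congrArg List.head? hu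
            simpa using this
          exact hd h6d.symm
      rw [List.infix_cons_iff]
      constructor
      · rintro (h | h)
        · exact Or.inr (Or.inr (h.isInfix))
        · exact Or.inr (Or.inr h)
      · rintro (h | h | h)
        · exact absurd h (hnotpre _ (by omega))
        · exact absurd h (hnotpre 3 (by omega))
        · exact Or.inr h

lemma reach_zero_iff (ds : List Nat) :
    (List.foldl natStep 0 ds = 3) ↔ [6, 6, 6] <:+: ds := by
  rw [reach_iff ds 0 (by omega)]
  constructor
  · rintro (h | h)
    · exact h.isInfix
    · exact h
  · exact Or.inr

-- ---- counting over numeric ranges ----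
lemma countP_range_mul (P : Nat → Bool) (c B : Nat) :
    (List.range (c * B)).countP P
      = ((List.range c).map (fun e => (List.range B).countP (fun r => P (e * B + r)))).sum := by
  induction c with
  | zero => simp
  | succ c IH =>
    have h1 : (c+1) * B = c * B + B := by ring
    rw [h1, List.range_add, List.countP_append, IH, List.range_succ, List.map_append,
        List.sum_append, List.countP_map]
    simp [Function.comp_def]

lemma pad_peel {k e r : Nat} (hr : r < 10^k) :
    pad (k+1) (e * 10^k + r) = e :: pad k r := by
  have hc : e * 10^k + r = 10^k * e + r := by ring
  have h1 : (e * 10^k + r) / 10^k = e := by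
    rw [hc, Nat.mul_add_div (by positivity), Nat.div_eq_of_lt hr]
    omega
  have h2 : (e * 10^k + r) % 10^k = r := by
    rw [hc, Nat.mul_add_mod, Nat.mod_eq_of_lt hr]
  show ((e * 10^k + r) / 10^k) :: pad k ((e * 10^k + r) % 10^k) = e :: pad k r
  rw [h1, h2]

lemma natA_spec : ∀ (k s : Nat),
    natA k s = (List.range (10^k)).countP (fun m => List.foldl natStep s (pad k m) == 3) := by
  intro k
  induction k with
  | zero =>
    intro s
    show (if s = 3 then 1 else 0)
        = (List.range 1).countP (fun m => List.foldl natStep s (pad 0 m) == 3)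
    have hr1 : (List.range 1) = [0] := rfl
    rw [hr1]
    by_cases h : s = 3
    · subst h; simp [List.countP_nil, pad]
    · simp [List.countP_nil, pad, h]
  | succ k IH =>
    intro s
    have h10 : (10:Nat)^(k+1) = 10 * 10^k := by ring
    rw [h10, countP_range_mul]
    show natA (k+1) s = _
    unfold natA
    congr 1
    apply List.map_congr_left
    intro e he
    rw [IH (natStep s e)]
    apply List.countP_congr
    intro r hr
    rw [List.mem_range] at hr
    rw [pad_peel hr]
    rfl

lemma valD_lt (ds : List Nat) (h : ∀ d ∈ ds, d < 10) : valD ds < 10 ^ ds.length := by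
  induction ds with
  | nil => simp [valD]
  | cons d t IH =>
    have hd : d < 10 := h d (by simp)
    have ht := IH (fun x hx => h x (by simp [hx]))
    show d * 10 ^ t.length + valD t < 10 ^ (t.length + 1)
    calc d * 10 ^ t.length + valD t
        < (d + 1) * 10 ^ t.length := by nlinarith
      _ ≤ 10 * 10 ^ t.length := by
          apply Nat.mul_le_mul_right
          omega
      _ = 10 ^ (t.length + 1) := by ring

lemma natG_spec : ∀ (ds : List Nat), (∀ d ∈ ds, d < 10) → ∀ (q : Nat),
    natG ds q = (List.range (valD ds)).countP (fun m => List.foldl natStep q (pad ds.length m) == 3) := by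
  intro ds
  induction ds with
  | nil => intro _ q; simp [natG, valD]
  | cons d t IH =>
    intro h q
    have hd : d < 10 := h d (by simp)
    have hvt : valD t < 10 ^ t.length := valD_lt t (fun x hx => h x (by simp [hx]))
    show natG (d :: t) q = (List.range (d * 10^t.length + valD t)).countP _
    rw [List.range_add, List.countP_append, List.countP_map]
    unfold natG
    congr 1
    · -- full blocks
      rw [countP_range_mul]
      apply congrArg
      apply List.map_congr_left
      intro e he
      rw [natA_spec]
      apply List.countP_congr
      intro r hr
      rw [List.mem_range] at hr
      have hp : pad (d :: t).length (e * 10 ^ t.length + r) = e :: pad t.length r := by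
        simpa using pad_peel (k := t.length) (e := e) hr
      simp only [hp]
      exact Iff.rfl
    · -- partial block
      rw [IH (fun x hx => h x (by simp [hx])) (natStep q d)]
      apply List.countP_congr
      intro r hr
      rw [List.mem_range] at hr
      have hp : pad (d :: t).length (d * 10 ^ t.length + r) = d :: pad t.length r := by
        simpa using pad_peel (k := t.length) (e := d) (by omega : r < 10 ^ t.length)
      simp only [Function.comp_apply, hp]
      exact Iff.rfl

-- ---- pad versus Nat.digits ----
lemma pad_eq : ∀ (L m : Nat), m < 10^L →
    pad L m = List.replicate (L - (Nat.digits 10 m).length) 0 ++ (Nat.digits 10 m).reverse := by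
  intro L
  induction L with
  | zero =>
    intro m hm
    have : m = 0 := by omega
    subst this
    simp [pad]
  | succ L IH =>
    intro m hm
    set a := m / 10^L with ha
    set r := m % 10^L with hr
    have hrlt : r < 10^L := Nat.mod_lt _ (by positivity)
    have hpow : (10:Nat)^(L+1) = 10 * 10^L := by ring
    have hm' : m = a * 10^L + r := by
      rw [ha, hr, Nat.mul_comm]
      exact (Nat.div_add_mod m (10^L)).symm
    show (a :: pad L r) = _
    by_cases haz : a = 0
    · have hmr : m = r := by
        rw [haz] at hm'
        simpa using hm'
      have hlen : (Nat.digits 10 m).length ≤ L := (Nat.digits_length_le_iff (by norm_num) m).mpr (by omega)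
      rw [IH r hrlt, ← hmr]
      have : (L + 1) - (Nat.digits 10 m).length = ((L - (Nat.digits 10 m).length) + 1) := by omega
      rw [this, List.replicate_succ, haz]
      simp
    · have ha10 : a < 10 := by
        rw [ha]
        exact (Nat.div_lt_iff_lt_mul (by positivity)).mpr (by omega)
      have hlenr : (Nat.digits 10 r).length ≤ L := (Nat.digits_length_le_iff (by norm_num) r).mpr hrlt
      have hdig : Nat.digits 10 r ++ List.replicate (L - (Nat.digits 10 r).length) 0 ++ Nat.digits 10 a
          = Nat.digits 10 m := by
        have := Nat.digits_append_zeroes_append_digits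
          (b := 10) (k := L - (Nat.digits 10 r).length) (m := a) (n := r) (by norm_num)
          (Nat.pos_of_ne_zero haz)
        rw [this]
        congr 1
        rw [hm']
        have : (Nat.digits 10 r).length + (L - (Nat.digits 10 r).length) = L := by omega
        rw [this]
        ring
      have hda : Nat.digits 10 a = [a] := Nat.digits_of_lt 10 a haz ha10
      have hlenm : (Nat.digits 10 m).length = L + 1 := by
        have := congrArg List.length hdig
        simp [hda] at this
        omega
      rw [hlenm]
      simp only [Nat.sub_self, List.replicate_zero, List.nil_append]
      rw [← hdig, hda]
      simp only [List.reverse_append, List.reverse_cons, List.reverse_nil, List.nil_append,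
        List.reverse_replicate]
      rw [IH r hrlt]
      simp

lemma foldl_natStep_replicate_zero (j : Nat) (l : List Nat) :
    List.foldl natStep 0 (List.replicate j 0 ++ l) = List.foldl natStep 0 l := by
  induction j with
  | zero => simp
  | succ j IH => simpa [List.replicate_succ, natStep] using IH

lemma pvBridge {L m : Nat} (hm : m < 10^L) :
    (List.foldl natStep 0 (pad L m) == 3) = pvHas666 (m : Int) := by
  rw [pad_eq L m hm, foldl_natStep_replicate_zero]
  by_cases h0 : m = 0
  · subst h0
    have hz : pvHas666 ((0 : Nat) : Int) = false := pvHas666_small (by norm_num)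
    have hl : (List.foldl natStep 0 ((Nat.digits 10 0).reverse) == 3) = false := by decide
    rw [hl, hz]
  · rw [Bool.eq_iff_iff, beq_iff_eq, reach_zero_iff]
    have hpal : ([6,6,6] : List Nat) = ([6,6,6] : List Nat).reverse := rfl
    rw [hpal, List.reverse_infix]
    exact pvInfix_iff_has666 m (by omega)

-- ---- valD of the reversed digit list ----
lemma valD_append_singleton (A : List Nat) (d : Nat) : valD (A ++ [d]) = 10 * valD A + d := by
  induction A with
  | nil => simp [valD]
  | cons a A IH =>
    show a * 10 ^ (A ++ [d]).length + valD (A ++ [d]) = 10 * (a * 10 ^ A.length + valD A) + d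
    rw [IH]
    simp [List.length_append, pow_succ]
    ring

lemma valD_reverse (l : List Nat) : valD l.reverse = Nat.ofDigits 10 l := by
  induction l with
  | nil => simp [valD]
  | cons d l IH =>
    rw [List.reverse_cons, valD_append_singleton, IH, Nat.ofDigits_cons]
    ring

-- ---- the port pvCountFrom computes natG / natA ----
lemma pvStep_natCast (q d : Nat) : pvStep (q : Int) (d : Int) = ((natStep q d : Nat) : Int) := by
  unfold pvStep natStep
  by_cases hq : q = 3
  · simp [hq]
  · rw [if_neg (by exact_mod_cast hq), if_neg hq]
    by_cases hd : d = 6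
    · simp [hd]
    · rw [if_neg (by exact_mod_cast hd), if_neg hd]
      simp

lemma pvRow_natA (k : Nat) {s : Nat} (h : s ≤ 3) :
    pvRow [((natA k 0 : Nat) : Int), ((natA k 1 : Nat) : Int), ((natA k 2 : Nat) : Int), ((natA k 3 : Nat) : Int)] ((s : Nat) : Int)
      = ((natA k s : Nat) : Int) := by
  interval_cases s <;> simp [pvRow]

lemma pvFoldRow (k c : Nat) (q : Nat) (hq : q ≤ 3) :
    (PySem.List.pyRange 0 (c : Int) 1).foldl
        (fun a e => a + pvRow [((natA k 0 : Nat) : Int), (natA k 1 : Int), (natA k 2 : Int), (natA k 3 : Int)] (pvStep (q : Int) e)) 0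
      = ((((List.range c).map (fun e => natA k (natStep q e))).sum : Nat) : Int) := by
  rw [PySem.List.foldl_add, PySem.List.pyRange_one]
  have hco : ((c : Int) - 0).toNat = c := by omega
  rw [hco, zero_add, List.map_map, Nat.cast_list_sum, List.map_map]
  congr 1
  apply List.map_congr_left
  intro e he
  show pvRow _ (pvStep (q : Int) ((0 : Int) + (e : Int))) = _
  have h0 : ((0 : Int) + (e : Int)) = ((e : Nat) : Int) := by omega
  rw [h0, pvStep_natCast q e, pvRow_natA k (natStep_le q e hq)]
  rfl

lemma pvCountFrom_spec : ∀ (ds : List Nat), (∀ d ∈ ds, d < 10) → ∀ (q : Nat), q ≤ 3 →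
    pvCountFrom (ds.map (fun d : Nat => (d : Int))) (q : Int)
      = (((natG ds q : Nat) : Int),
         [((natA ds.length 0 : Nat) : Int), (natA ds.length 1 : Int), (natA ds.length 2 : Int), (natA ds.length 3 : Int)]) := by
  intro ds
  induction ds with
  | nil =>
    intro _ q hq
    rfl
  | cons d t IH =>
    intro h q hq
    have hrec := IH (fun x hx => h x (by simp [hx])) (natStep q d) (natStep_le q d hq)
    simp only [List.map_cons, pvCountFrom, pvStep_natCast q d, hrec]
    refine Prod.ext ?_ ?_
    · -- first component
      show ((natG t (natStep q d) : Nat) : Int)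
          + (PySem.List.pyRange 0 (d : Int) 1).foldl
              (fun a e => a + pvRow [((natA t.length 0 : Nat) : Int), (natA t.length 1 : Int), (natA t.length 2 : Int), (natA t.length 3 : Int)] (pvStep (q : Int) e)) 0
          = ((natG (d :: t) q : Nat) : Int)
      rw [pvFoldRow t.length d q hq]
      show _ = ((((List.range d).map (fun e => natA t.length (natStep q e))).sum
          + natG t (natStep q d) : Nat) : Int)
      push_cast
      ring
    · -- second component: the new row
      have h4 : PySem.List.pyRange 0 4 1 = [(0 : Int), 1, 2, 3] := by decide
      rw [h4]
      simp only [List.map_cons, List.map_nil, List.cons.injEq, and_true]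
      refine ⟨?_, ?_, ?_, ?_⟩
      · exact pvFoldRow t.length 10 0 (by norm_num)
      · exact pvFoldRow t.length 10 1 (by norm_num)
      · exact pvFoldRow t.length 10 2 (by norm_num)
      · exact pvFoldRow t.length 10 3 (by norm_num)

-- ---- pvCountLt computes specCnt ----
lemma pvDigitCharVal {d : Nat} (h : d < 10) : ((Nat.digitChar d).toNat : Int) - 48 = (d : Int) := by
  interval_cases d <;> decide

lemma pvCountLt_eq (X : Nat) : pvCountLt (X : Int) = ((specCnt X : Nat) : Int) := by
  by_cases h0 : X = 0
  · subst h0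
    rfl
  · have hx : ¬ ((X : Int) ≤ 0) := by omega
    rw [pvCountLt, if_neg hx]
    have hall : ∀ d ∈ (Nat.digits 10 X).reverse, d < 10 := by
      intro d hd
      rw [List.mem_reverse] at hd
      exact Nat.digits_lt_base (by norm_num) hd
    have hdig : (PySem.Int.toStr (X : Int)).toList.map (fun c => ((c.toNat : Int) - 48))
        = ((Nat.digits 10 X).reverse.map (fun d : Nat => (d : Int))) := by
      have htl : (PySem.Int.toStr (X : Int)).toList = Nat.toDigits 10 X := by
        rw [PySem.Int.toList_toStr, PySem.Int.toChars, if_neg (by omega)]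
        norm_num
      rw [htl, pvToDigits_eq X h0, ← List.map_reverse, List.map_map]
      apply List.map_congr_left
      intro d hd
      rw [List.mem_reverse] at hd
      exact pvDigitCharVal (Nat.digits_lt_base (by norm_num) hd)
    rw [hdig]
    have hspec := pvCountFrom_spec ((Nat.digits 10 X).reverse) hall 0 (by norm_num)
    have h1 : (pvCountFrom (((Nat.digits 10 X).reverse).map (fun d : Nat => (d : Int))) (0 : Int)).1
        = ((natG ((Nat.digits 10 X).reverse) 0 : Nat) : Int) :=
      congrArg Prod.fst hspec
    rw [h1]
    congr 1
    rw [natG_spec _ hall 0]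
    have hval : valD ((Nat.digits 10 X).reverse) = X := by
      rw [valD_reverse, Nat.ofDigits_digits]
    rw [hval]
    unfold specCnt
    apply List.countP_congr
    intro m hm
    rw [List.mem_range] at hm
    have hXL : X < 10 ^ ((Nat.digits 10 X).reverse).length := by
      rw [List.length_reverse]
      exact (Nat.digits_length_le_iff (by norm_num) X).mp le_rfl
    rw [pvBridge (L := ((Nat.digits 10 X).reverse).length) (m := m) (by omega)]

-- ---- specCnt facts ----
lemma specCnt_mono {a b : Nat} (h : a ≤ b) : specCnt a ≤ specCnt b := by
  unfold specCnt
  have : b = a + (b - a) := by omega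
  rw [this, List.range_add, List.countP_append]
  omega

lemma specCnt_succ (b : Nat) :
    specCnt (b + 1) = specCnt b + (if pvHas666 (b : Int) then 1 else 0) := by
  unfold specCnt
  rw [List.range_succ, List.countP_append]
  simp [List.countP_cons]

lemma specCnt_gap {a b : Nat} (hab : a ≤ b)
    (h : ∀ m : Nat, a ≤ m → m < b → pvHas666 (m : Int) = false) : specCnt b = specCnt a := by
  unfold specCnt
  have hb : b = a + (b - a) := by omega
  have hz : List.countP (fun m : Nat => pvHas666 (m : Int)) ((List.range (b - a)).map (a + ·)) = 0 := by
    rw [List.countP_eq_zero]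
    intro x hx
    rw [List.mem_map] at hx
    obtain ⟨r, hr1, rfl⟩ := hx
    rw [List.mem_range] at hr1
    have hh := h (a + r) (by omega) (by omega)
    push_cast at hh
    simp [hh]
  rw [hb, List.range_add, List.countP_append, hz]
  omega

lemma specCnt_nth : ∀ k : Nat, specCnt ((pvNth k).toNat + 1) = k := by
  intro k
  induction k with
  | zero =>
    show specCnt 1 = 0
    have : specCnt 1 = specCnt 0 + (if pvHas666 ((0:Nat) : Int) then 1 else 0) := specCnt_succ 0
    rw [this]
    rw [pvHas666_small (show (0:Nat) < 666 by norm_num)]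
    simp [specCnt]
  | succ k IH =>
    have hb := pvNth_succ k
    have hn0 := pvNth_nonneg k
    have hn1 := pvNth_nonneg (k+1)
    have hgt : pvNth k < pvNth (k+1) := by rw [hb]; exact pvNext_gt _
    have hgap : specCnt ((pvNth (k+1)).toNat) = specCnt ((pvNth k).toNat + 1) := by
      apply specCnt_gap (by omega)
      intro m hm1 hm2
      apply pvNext_none (s := pvNth k) (by omega)
      rw [← hb]; omega
    have hhas : pvHas666 (((pvNth (k+1)).toNat : Nat) : Int) = true := by
      have : (((pvNth (k+1)).toNat : Nat) : Int) = pvNth (k+1) := by omega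
      rw [this, hb]; exact pvNext_has _
    rw [specCnt_succ, hhas, hgap, IH]
    simp

lemma specCnt_nth' (k : Nat) : specCnt ((pvNth (k+1)).toNat) = k := by
  have hb := pvNth_succ k
  have hn0 := pvNth_nonneg k
  have hgt : pvNth k < pvNth (k+1) := by rw [hb]; exact pvNext_gt _
  have hgap : specCnt ((pvNth (k+1)).toNat) = specCnt ((pvNth k).toNat + 1) := by
    apply specCnt_gap (by omega)
    intro m hm1 hm2
    apply pvNext_none (s := pvNth k) (by omega)
    rw [← hb]; omega
  rw [hgap, specCnt_nth]

-- ---- threshold characterisation and the binary search ----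
lemma pvThresh (n : Int) (h1 : 1 ≤ n) (x : Int) (hx : 0 ≤ x) :
    (n ≤ pvCountLt (x + 1)) ↔ pvNth n.toNat ≤ x := by
  have hc : pvCountLt (x + 1) = ((specCnt (x.toNat + 1) : Nat) : Int) := by
    have : (x + 1) = ((x.toNat + 1 : Nat) : Int) := by omega
    rw [this, pvCountLt_eq]
  rw [hc]
  constructor
  · intro h
    by_contra hlt
    rw [not_le] at hlt
    have hle : x.toNat + 1 ≤ (pvNth n.toNat).toNat := by
      have := pvNth_nonneg n.toNat
      omega
    have hmono := specCnt_mono hle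
    obtain ⟨k, hk⟩ : ∃ k, n.toNat = k + 1 := ⟨n.toNat - 1, by omega⟩
    rw [hk] at hmono
    rw [specCnt_nth' k] at hmono
    omega
  · intro h
    have hle : (pvNth n.toNat).toNat + 1 ≤ x.toNat + 1 := by
      have := pvNth_nonneg n.toNat
      omega
    have := specCnt_mono hle
    rw [specCnt_nth] at this
    omega

lemma pvMidFacts {lo hi : Int} (h : lo + 1 < hi) :
    lo < PySem.Int.floordiv (lo + hi) 2 ∧ PySem.Int.floordiv (lo + hi) 2 < hi ∧
    2 * (PySem.Int.floordiv (lo + hi) 2 - lo) ≤ hi - lo ∧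
    2 * (hi - PySem.Int.floordiv (lo + hi) 2) ≤ hi - lo + 1 := by
  rw [PySem.Int.floordiv_eq_ediv_of_pos (by norm_num)]
  have hq := Int.mul_ediv_add_emod (lo + hi) 2
  have hr1 := Int.emod_nonneg (lo + hi) (show (2:Int) ≠ 0 by norm_num)
  have hr2 := Int.emod_lt_of_pos (lo + hi) (show (0:Int) < 2 by norm_num)
  omega

lemma pvSearch_eq (n : Int) (h1 : 1 ≤ n) : ∀ (f : Nat) (lo hi : Int), 0 ≤ lo →
    lo < pvNth n.toNat → pvNth n.toNat ≤ hi → hi - lo ≤ 2^f →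
    pvSearch n f lo hi = pvNth n.toNat := by
  intro f
  induction f with
  | zero =>
    intro lo hi h0 hl hh hf
    show hi = pvNth n.toNat
    omega
  | succ f IH =>
    intro lo hi h0 hl hh hf
    show (if lo + 1 < hi then _ else hi) = pvNth n.toNat
    by_cases hcond : lo + 1 < hi
    · rw [if_pos hcond]
      obtain ⟨hm1, hm2, hm3, hm4⟩ := pvMidFacts hcond
      set mid := PySem.Int.floordiv (lo + hi) 2 with hmid
      have h2f : (2:Int)^(f+1) = 2 * 2^f := by ring
      by_cases hP : n ≤ pvCountLt (mid + 1)
      · rw [if_pos hP]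
        have hnth : pvNth n.toNat ≤ mid := (pvThresh n h1 mid (by omega)).mp hP
        exact IH lo mid h0 hl hnth (by omega)
      · rw [if_neg hP]
        have hnth : ¬ (pvNth n.toNat ≤ mid) := fun hc => hP ((pvThresh n h1 mid (by omega)).mpr hc)
        exact IH mid hi (by omega) (by omega) hh (by omega)
    · rw [if_neg hcond]
      omega

-- n = 0: the search always descends to lo + 1
lemma pvCountLt_nonneg (x : Int) : 0 ≤ pvCountLt x := by
  by_cases h : x ≤ 0
  · rw [pvCountLt, if_pos h]
  · have : x = ((x.toNat : Nat) : Int) := by omega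
    rw [this, pvCountLt_eq]
    positivity

lemma pvSearch_zero : ∀ (f : Nat) (lo hi : Int), lo + 1 ≤ hi → hi - lo ≤ 2^f →
    pvSearch 0 f lo hi = lo + 1 := by
  intro f
  induction f with
  | zero =>
    intro lo hi h1 hf
    show hi = lo + 1
    omega
  | succ f IH =>
    intro lo hi h1 hf
    show (if lo + 1 < hi then _ else hi) = lo + 1
    by_cases hcond : lo + 1 < hi
    · rw [if_pos hcond]
      obtain ⟨hm1, hm2, hm3, hm4⟩ := pvMidFacts hcond
      set mid := PySem.Int.floordiv (lo + hi) 2 with hmid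
      have h2f : (2:Int)^(f+1) = 2 * 2^f := by ring
      rw [if_pos (by have := pvCountLt_nonneg (mid + 1); omega)]
      exact IH lo mid (by omega) (by omega)
    · rw [if_neg hcond]
      omega

-- ---- main ----
lemma pvMainPos (n : Int) (h1 : 1 ≤ n) (h2 : n ≤ 2147483648) :
    get_end_number n = get_end_number_alt n := by
  have hA : get_end_number n = pvNth n.toNat := by
    show pvGoA n 2147483648666 0 0 = pvNth n.toNat
    have hz : (0 : Int) = n - (n.toNat : Int) := by omega
    have := pvGoA_eq n 2147483648666 n.toNat 0 (by omega) le_rfl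
      (by
        have := pvNth_le n.toNat
        show pvIter n.toNat 0 ≤ 0 + (2147483648666 : Int)
        unfold pvNth at this
        have hn : (n.toNat : Int) ≤ 2147483648 := by omega
        omega)
    calc pvGoA n 2147483648666 0 0
        = pvGoA n 2147483648666 0 (n - (n.toNat : Int)) := by rw [← hz]
      _ = pvIter n.toNat 0 := this
      _ = pvNth n.toNat := rfl
  have hB : get_end_number_alt n = pvNth n.toNat := by
    show pvSearch n 64 0 (1000 * n + 666) = pvNth n.toNat
    apply pvSearch_eq n h1 64 0 (1000 * n + 666) le_rfl
    · have hge := pvIter_ge n.toNat 0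
      unfold pvNth
      omega
    · have := pvNth_le n.toNat
      have hn : ((n.toNat : Nat) : Int) = n := by omega
      omega
    · have : (2:Int)^64 = 18446744073709551616 := by norm_num
      omega
  rw [hA, hB]

lemma pvMainZero : get_end_number 0 = get_end_number_alt 0 := by
  have hA : get_end_number 0 = 1 := by
    show pvGoA 0 2147483648666 0 0 = 1
    have hf : (2147483648666 : Nat) = 2147483648665 + 1 := by norm_num
    rw [hf]
    show (let num' := (0:Int) + 1;
      let cnt' := if PySem.Str.isIn "666" (PySem.Int.toStr num') then (0:Int) + 1 else 0;
      if cnt' = 0 then num' else pvGoA 0 2147483648665 num' cnt') = 1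
    have hs : PySem.Chars.isIn ['6', '6', '6'] (PySem.Int.toChars 1) = false := by decide
    simp [hs]
  have hB : get_end_number_alt 0 = 1 := by
    show pvSearch 0 64 0 (1000 * 0 + 666) = 1
    have : (1000 : Int) * 0 + 666 = 666 := by norm_num
    rw [this]
    have := pvSearch_zero 64 0 666 (by norm_num) (by norm_num)
    omega
  rw [hA, hB]

-- ===== VERDICT (by name: the statement is the Claim_ definition above) =====
theorem get_end_number_spec : Claim_equal_get_end_number := by
  intro n hd hpre
  unfold Spec_get_end_number
  have hdom := of_decide_eq_true hd
  unfold Pre_get_end_number at hpre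
  rcases eq_or_lt_of_le hpre with h0 | h1
  · rw [← h0]; exact pvMainZero
  · exact pvMainPos n h1 hdom.2
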